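-- pv_equiv track=rewrite | github.com/davi-furtado/app-algoritmo-fisico | backend/conversor.py | indentLevels
-- ===== SOURCE A (Python) =====
-- def getKeyword(tokens):
--     if len(tokens) >= 2 and tokens[0] == 'senao' and tokens[1] == 'se':
--         return 'senao se', tokens[2:]
--
--     if len(tokens) >= 2 and tokens[0] == 'fim':
--         return ' '.join(tokens[:2]), tokens[2:]
--
--     return tokens[0], tokens[1:]
--
-- def indentLevels(linhas):
--     nivel = 0
--     niveis = []
--
--     for linha in linhas:
--         tokens = linha.split()
--         kw, _ = getKeyword(tokens)
--
--         if kw in {'fim se', 'fim repita', 'fim enquanto', 'fim'}: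
--             nivel -= 1
--
--         niveis.append(max(nivel, 0))
--
--         if kw in {'se', 'repita', 'enquanto'}:
--             nivel += 1
--
--     return niveis
-- ===== SOURCE B (Python) =====
-- STARTS = {'se', 'repita', 'enquanto'}
-- ENDS = {'fim se', 'fim repita', 'fim enquanto', 'fim'}
--
-- def getKeyword(tokens):
--     if len(tokens) >= 2 and tokens[0] == 'senao' and tokens[1] == 'se':
--         return 'senao se', tokens[2:]
--
--     if len(tokens) >= 2 and tokens[0] == 'fim':
--         return ' '.join(tokens[:2]), tokens[2:]
--
--     return tokens[0], tokens[1:]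
--
-- def indentLevels(linhas):
--     # classify -> accumulate -> map
--     kws = [getKeyword(linha.split())[0] for linha in linhas]
--     deltas = [(kw in STARTS) - (kw in ENDS) for kw in kws]
--     states = []
--     s = 0
--     for d in deltas:
--         states.append(s)
--         s += d
--     return [max(s - (kw in ENDS), 0) for s, kw in zip(states, kws)]
-- ===== Notes on version B (the rewrite author's own statement) =====
-- stated objective: alternative
-- what changed: Replaced A's single interleaved loop (mutating a level counter while appending clamped values) with a three-stage pipeline: classify each line to its keyword delta, compute prefix sums of the deltas, then map each prefix state to max(state - end, 0).
import Mathlib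
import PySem

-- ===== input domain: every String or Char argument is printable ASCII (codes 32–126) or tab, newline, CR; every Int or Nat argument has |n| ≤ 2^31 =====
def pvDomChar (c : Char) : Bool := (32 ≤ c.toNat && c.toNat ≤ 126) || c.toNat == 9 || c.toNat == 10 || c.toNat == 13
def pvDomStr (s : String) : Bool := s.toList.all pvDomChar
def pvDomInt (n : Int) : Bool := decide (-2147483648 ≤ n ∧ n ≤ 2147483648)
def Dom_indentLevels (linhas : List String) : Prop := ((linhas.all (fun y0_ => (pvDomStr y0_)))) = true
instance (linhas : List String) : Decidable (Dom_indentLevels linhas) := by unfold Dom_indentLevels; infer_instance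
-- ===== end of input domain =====

-- B restructures A's single interleaved loop into classify → accumulate (prefix sums) → map; same values, objective: alternative decomposition.

-- ===== PORT A =====
-- shared module helper (identical in A and B); on empty `tokens` Python raises
-- IndexError at `tokens[0]` — Pre_ excludes that, the `.getD ""` is only a totalization guard.
def getKeyword (tokens : List String) : String × List String :=
  if 2 ≤ tokens.length && (PySem.List.pyGet? tokens 0 == some "senao")
      && (PySem.List.pyGet? tokens 1 == some "se") then
    ("senao se", tokens.drop 2)                                   -- tokens[2:]
  else if 2 ≤ tokens.length && (PySem.List.pyGet? tokens 0 == some "fim") then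
    (PySem.Str.join " " (tokens.take 2), tokens.drop 2)           -- ' '.join(tokens[:2]), tokens[2:]
  else
    ((PySem.List.pyGet? tokens 0).getD "", tokens.drop 1)         -- tokens[0], tokens[1:]

-- kw in {'fim se', 'fim repita', 'fim enquanto', 'fim'} / {'se', 'repita', 'enquanto'}
def isEndKw (kw : String) : Bool :=
  kw == "fim se" || kw == "fim repita" || kw == "fim enquanto" || kw == "fim"
def isStartKw (kw : String) : Bool :=
  kw == "se" || kw == "repita" || kw == "enquanto"

def indentLevels (linhas : List String) : List Int :=
  (linhas.foldl (fun (st : Int × List Int) linha =>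
      let tokens := PySem.Str.split₀ linha
      let kw := (getKeyword tokens).1
      let nivel := if isEndKw kw then st.1 - 1 else st.1
      let niveis := st.2 ++ [max nivel 0]
      let nivel := if isStartKw kw then nivel + 1 else nivel
      (nivel, niveis)) ((0 : Int), ([] : List Int))).2

-- ===== PORT B =====
-- the `for d in deltas: states.append(s); s += d` loop of Source B
def statesFrom (s : Int) : List Int → List Int
  | [] => []
  | d :: ds => s :: statesFrom (s + d) ds

def indentLevels_alt (linhas : List String) : List Int :=
  let kws := linhas.map (fun linha => (getKeyword (PySem.Str.split₀ linha)).1)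
  let deltas := kws.map (fun kw =>
    (if isStartKw kw then (1 : Int) else 0) - (if isEndKw kw then (1 : Int) else 0))
  let states := statesFrom 0 deltas
  List.zipWith (fun s kw => max (s - (if isEndKw kw then (1 : Int) else 0)) 0) states kws

-- ===== PRECONDITION & SPEC =====
-- Pre_ excludes inputs with a blank/whitespace-only line, on which Python A raises IndexError.
def Pre_indentLevels (linhas : List String) : Prop :=
  ∀ linha ∈ linhas, PySem.Str.split₀ linha ≠ []
instance (linhas : List String) : Decidable (Pre_indentLevels linhas) := by
  unfold Pre_indentLevels; infer_instance

def pvWitness_indentLevels : List String := ["se x > 1", "escreva(x)", "fim se"]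

def Spec_indentLevels (linhas : List String) (out : List Int) : Prop := out = indentLevels_alt linhas
instance (linhas : List String) (out : List Int) : Decidable (Spec_indentLevels linhas out) := by unfold Spec_indentLevels; infer_instance

-- ===== CLAIM (what is proved, stated in full; the proofs are below) =====
def Claim_equal_indentLevels : Prop := ∀ (linhas : List String), Dom_indentLevels linhas → Pre_indentLevels linhas → Spec_indentLevels linhas (indentLevels linhas)

-- ===== LEMMAS AND PROOFS =====

-- the per-line keyword, shared shape of both proofs
def kwOf (linha : String) : String := (getKeyword (PySem.Str.split₀ linha)).1

def deltaOf (kw : String) : Int :=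
  (if isStartKw kw then (1 : Int) else 0) - (if isEndKw kw then (1 : Int) else 0)

-- clean recursion equivalent to A's foldl
def loopA (nivel : Int) : List String → List Int
  | [] => []
  | linha :: ls =>
    let kw := kwOf linha
    let n1 := if isEndKw kw then nivel - 1 else nivel
    max n1 0 :: loopA (if isStartKw kw then n1 + 1 else n1) ls

theorem foldl_eq_loopA (ls : List String) : ∀ (n : Int) (acc : List Int),
    (ls.foldl (fun (st : Int × List Int) linha =>
      let tokens := PySem.Str.split₀ linha
      let kw := (getKeyword tokens).1
      let nivel := if isEndKw kw then st.1 - 1 else st.1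
      let niveis := st.2 ++ [max nivel 0]
      let nivel := if isStartKw kw then nivel + 1 else nivel
      (nivel, niveis)) (n, acc)).2 = acc ++ loopA n ls := by
  induction ls with
  | nil => intro n acc; simp [loopA]
  | cons linha ls ih =>
    intro n acc
    simp only [List.foldl_cons, loopA, ih, kwOf]
    rw [List.append_assoc]
    rfl

theorem loopA_eq_alt (ls : List String) : ∀ (n : Int),
    loopA n ls =
      List.zipWith (fun s kw => max (s - (if isEndKw kw then (1 : Int) else 0)) 0)
        (statesFrom n ((ls.map kwOf).map deltaOf)) (ls.map kwOf) := by
  induction ls with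
  | nil => intro n; simp [loopA, statesFrom]
  | cons linha ls ih =>
    intro n
    simp only [loopA, List.map_cons, statesFrom, List.zipWith_cons_cons]
    refine congrArg₂ _ ?_ ?_
    · by_cases h : isEndKw (kwOf linha) <;> simp [h]
    · rw [ih]
      have h : (if isStartKw (kwOf linha) then
                (if isEndKw (kwOf linha) then n - 1 else n) + 1
              else (if isEndKw (kwOf linha) then n - 1 else n)) = n + deltaOf (kwOf linha) := by
        unfold deltaOf; split_ifs <;> omega
      rw [h]

-- ===== VERDICT (by name: the statement is the Claim_ definition above) =====
theorem indentLevels_spec : Claim_equal_indentLevels := by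
  intro linhas _ _
  unfold Spec_indentLevels indentLevels indentLevels_alt
  rw [foldl_eq_loopA, loopA_eq_alt]
  rfl
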